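/- GENERATED by c/gen_decode.py: every decode fact of the image. -/
import ProgX.Base.Dec.All
import Toy.Dec.D000
import Toy.Dec.D001
import Toy.Dec.D002
import Toy.Dec.D003
import Toy.Dec.D004
import Toy.Dec.D005
import Toy.Dec.D006
import Toy.Dec.D007
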